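-- pv_equiv track=rewrite | github.com/odik8/BSE12 | individual.py | count_and_sum_recursive
-- ===== SOURCE A (Python) =====
-- def count_and_sum_recursive(numbers, index=0, count=0, total_sum=0):
--     if index == len(numbers):
--         return count, total_sum
--
--     current_number = numbers[index]
--     if current_number < 0:
--         return count, total_sum
--     else:
--         count += 1
--         total_sum += current_number
--         return count_and_sum_recursive(numbers, index + 1, count, total_sum)
-- ===== SOURCE B (Python) =====
-- def count_and_sum_recursive(numbers, index=0, count=0, total_sum=0):
--     # Two-pass: first find the stopping position, then count/sum by arithmetic.
--     n = len(numbers)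
--     i = index
--     while i < n and numbers[i] >= 0:
--         i += 1
--     return count + (i - index), total_sum + sum(numbers[j] for j in range(index, i))
-- ===== Notes on version B (the rewrite author's own statement) =====
-- stated objective: alternative
-- what changed: Replaces A's 4-argument tail recursion with an iterative two-pass scheme: a scan that only finds the first negative position, then the count as a subtraction of indices and the sum over that index range.
import Mathlib
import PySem

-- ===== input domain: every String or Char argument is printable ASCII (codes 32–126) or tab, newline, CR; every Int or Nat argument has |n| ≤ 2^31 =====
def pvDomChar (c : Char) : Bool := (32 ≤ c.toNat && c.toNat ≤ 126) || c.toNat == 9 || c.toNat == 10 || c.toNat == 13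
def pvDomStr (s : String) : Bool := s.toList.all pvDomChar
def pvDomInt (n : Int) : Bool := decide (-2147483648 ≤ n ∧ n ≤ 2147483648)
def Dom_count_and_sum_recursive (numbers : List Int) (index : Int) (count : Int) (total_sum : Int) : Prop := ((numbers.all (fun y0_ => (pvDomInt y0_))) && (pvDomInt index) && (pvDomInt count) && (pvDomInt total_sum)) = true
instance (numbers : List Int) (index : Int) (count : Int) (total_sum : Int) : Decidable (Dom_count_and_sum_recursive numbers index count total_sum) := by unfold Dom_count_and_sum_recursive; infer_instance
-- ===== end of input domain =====

-- B replaces A's 4-argument tail recursion by an iterative two-pass scheme (find the stop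
-- position, then count by index subtraction and sum over that range); same O(n) cost.


-- ===== PORT A =====
def count_and_sum_recursive (numbers : List Int) (index : Int) (count : Int) (total_sum : Int) : Int × Int :=
  if index = (numbers.length : Int) then (count, total_sum)
  else
    match e : PySem.List.pyGet? numbers index with
    | none => (count, total_sum)  -- IndexError in Python; excluded by Pre_
    | some current =>
      if current < 0 then (count, total_sum)
      else count_and_sum_recursive numbers (index + 1) (count + 1) (total_sum + current)
termination_by ((numbers.length : Int) - index).toNat
decreasing_by
  have hin : PySem.Raise.InRange numbers.length index := by
    by_contra h
    rw [← PySem.List.pyGet?_eq_none_iff (xs := numbers)] at h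
    simp [h] at e
  simp [PySem.Raise.InRange] at hin
  omega

-- ===== PORT B =====
-- 'while i < n and numbers[i] >= 0: i += 1' — returns the final i
def casScanEnd (numbers : List Int) (n : Int) (i : Int) : Int :=
  if i < n then
    if PySem.List.pyGetD numbers i 0 ≥ 0 then casScanEnd numbers n (i + 1) else i
  else i
termination_by (n - i).toNat
decreasing_by omega

def count_and_sum_recursive_alt (numbers : List Int) (index : Int) (count : Int) (total_sum : Int) : Int × Int :=
  let n : Int := numbers.length
  let i := casScanEnd numbers n index
  (count + (i - index),
   total_sum + (PySem.List.pyRange index i 1).foldl (fun s j => s + PySem.List.pyGetD numbers j 0) 0)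

-- ===== PRECONDITION & SPEC =====
-- Pre_ excludes exactly the inputs where Python A raises IndexError: start indices outside
-- [-len, len] (numbers[index] out of range).
def Pre_count_and_sum_recursive (numbers : List Int) (index : Int) (count : Int) (total_sum : Int) : Prop :=
  -(numbers.length : Int) ≤ index ∧ index ≤ (numbers.length : Int)
instance (numbers : List Int) (index : Int) (count : Int) (total_sum : Int) : Decidable (Pre_count_and_sum_recursive numbers index count total_sum) := by unfold Pre_count_and_sum_recursive; infer_instance
def pvWitness_count_and_sum_recursive : List Int × Int × Int × Int := ([3, 1, -2, 5], 0, 0, 0)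

def Spec_count_and_sum_recursive (numbers : List Int) (index : Int) (count : Int) (total_sum : Int) (out : Int × Int) : Prop := out = count_and_sum_recursive_alt numbers index count total_sum
instance (numbers : List Int) (index : Int) (count : Int) (total_sum : Int) (out : Int × Int) : Decidable (Spec_count_and_sum_recursive numbers index count total_sum out) := by unfold Spec_count_and_sum_recursive; infer_instance

-- ===== CLAIM (what is proved, stated in full; the proofs are below) =====
def Claim_equal_count_and_sum_recursive : Prop := ∀ (numbers : List Int) (index : Int) (count : Int) (total_sum : Int), Dom_count_and_sum_recursive numbers index count total_sum → Pre_count_and_sum_recursive numbers index count total_sum → Spec_count_and_sum_recursive numbers index count total_sum (count_and_sum_recursive numbers index count total_sum)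
-- ===== LEMMAS AND PROOFS =====

lemma casScanEnd_stop (numbers : List Int) (n i : Int) (h : ¬ i < n) :
    casScanEnd numbers n i = i := by
  rw [casScanEnd]; simp [h]

lemma casScanEnd_neg (numbers : List Int) (n i : Int) (h : i < n)
    (hx : ¬ PySem.List.pyGetD numbers i 0 ≥ 0) :
    casScanEnd numbers n i = i := by
  rw [casScanEnd]; simp [h, hx]

lemma casScanEnd_step (numbers : List Int) (n i : Int) (h : i < n)
    (hx : PySem.List.pyGetD numbers i 0 ≥ 0) :
    casScanEnd numbers n i = casScanEnd numbers n (i + 1) := by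
  rw [casScanEnd]; simp [h, hx]

lemma casScanEnd_ge (numbers : List Int) (n : Int) : ∀ i : Int, i ≤ casScanEnd numbers n i := by
  intro i
  induction i using casScanEnd.induct numbers n with
  | case1 i h hx ih => rw [casScanEnd_step numbers n i h hx]; omega
  | case2 i h hx => rw [casScanEnd_neg numbers n i h hx]
  | case3 i h => rw [casScanEnd_stop numbers n i h]

lemma alt_unfold (numbers : List Int) (index count total_sum : Int) :
    count_and_sum_recursive_alt numbers index count total_sum =
      (count + (casScanEnd numbers numbers.length index - index),
       total_sum + ((PySem.List.pyRange index (casScanEnd numbers numbers.length index) 1).map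
         (fun j => PySem.List.pyGetD numbers j 0)).sum) := by
  rw [count_and_sum_recursive_alt]
  simp [PySem.List.foldl_add]

lemma main_lemma (numbers : List Int) : ∀ (index count total_sum : Int),
    -(numbers.length : Int) ≤ index → index ≤ (numbers.length : Int) →
    count_and_sum_recursive numbers index count total_sum =
      count_and_sum_recursive_alt numbers index count total_sum := by
  intro index count total_sum
  induction index, count, total_sum using count_and_sum_recursive.induct numbers with
  | case1 count total_sum =>
    intro _ _
    rw [count_and_sum_recursive, alt_unfold]
    rw [casScanEnd_stop numbers _ _ (by omega)]
    simp [PySem.List.pyRange_one_eq_nil (le_refl (numbers.length : Int))]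
  | case2 index count total_sum h e =>
    intro hlo hhi
    exfalso
    rw [PySem.List.pyGet?_eq_none_iff] at e
    simp [PySem.Raise.InRange] at e
    omega
  | case3 index count total_sum h current e hcur =>
    intro hlo hhi
    have hget : PySem.List.pyGetD numbers index 0 = current := by
      simp [PySem.List.pyGetD, e]
    rw [count_and_sum_recursive, if_neg h]
    split
    next heq => exact absurd (heq.symm.trans e) (by simp)
    next current' heq =>
    have hc : current' = current := by
      have h2 := heq.symm.trans e; injection h2
    subst hc
    rw [if_pos hcur]
    rw [alt_unfold]
    rw [casScanEnd_neg numbers _ index (by omega) (by omega)]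
    simp [PySem.List.pyRange_one_eq_nil (le_refl index)]
  | case4 index count total_sum h current e hcur ih =>
    intro hlo hhi
    have hin : PySem.Raise.InRange numbers.length index := by
      by_contra hc
      rw [← PySem.List.pyGet?_eq_none_iff (xs := numbers)] at hc
      simp [hc] at e
    simp [PySem.Raise.InRange] at hin
    have hget : PySem.List.pyGetD numbers index 0 = current := by
      simp [PySem.List.pyGetD, e]
    rw [count_and_sum_recursive, if_neg h]
    split
    next heq => exact absurd (heq.symm.trans e) (by simp)
    next current' heq =>
    have hc : current' = current := by
      have h2 := heq.symm.trans e; injection h2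
    subst hc
    rw [if_neg hcur]
    rw [ih (by omega) (by omega)]
    rw [alt_unfold, alt_unfold]
    rw [casScanEnd_step numbers _ index (by omega) (by rw [hget]; omega)]
    have hge : index + 1 ≤ casScanEnd numbers numbers.length (index + 1) :=
      casScanEnd_ge numbers _ (index + 1)
    conv_rhs => rw [PySem.List.pyRange_one_cons
      (show index < casScanEnd numbers numbers.length (index + 1) by omega)]
    simp [hget]
    constructor
    · ring
    · ring

-- ===== VERDICT (by name: the statement is the Claim_ definition above) =====
theorem count_and_sum_recursive_spec : Claim_equal_count_and_sum_recursive := by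
  intro numbers index count total_sum _ hpre
  unfold Spec_count_and_sum_recursive
  exact main_lemma numbers index count total_sum hpre.1 hpre.2
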